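-- pv_equiv track=rewrite | github.com/lucifer1198/Codesignal | solutions/python/2017/rightmostRoundNumber.py | rightmostRoundNumber
-- ===== SOURCE A (Python) =====
-- def rightmostRoundNumber(a):
--     x = 0
--     n = 0
--     f = False
--     while x < len(a):
--         if a[x] % 10 == 0:
--             n = x
--             f = True
--         x += 1
--     if f:
--         return n
--     return -1
-- ===== SOURCE B (Python) =====
-- def rightmostRoundNumber(a):
--     for i in range(len(a) - 1, -1, -1):
--         if a[i] % 10 == 0:
--             return i
--     return -1
-- ===== Notes on version B (the rewrite author's own statement) =====
-- stated objective: simpler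
-- what changed: Reverse scan returning the first divisible-by-10 index instead of a forward scan maintaining a flag and a stored last index.
import Mathlib
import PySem

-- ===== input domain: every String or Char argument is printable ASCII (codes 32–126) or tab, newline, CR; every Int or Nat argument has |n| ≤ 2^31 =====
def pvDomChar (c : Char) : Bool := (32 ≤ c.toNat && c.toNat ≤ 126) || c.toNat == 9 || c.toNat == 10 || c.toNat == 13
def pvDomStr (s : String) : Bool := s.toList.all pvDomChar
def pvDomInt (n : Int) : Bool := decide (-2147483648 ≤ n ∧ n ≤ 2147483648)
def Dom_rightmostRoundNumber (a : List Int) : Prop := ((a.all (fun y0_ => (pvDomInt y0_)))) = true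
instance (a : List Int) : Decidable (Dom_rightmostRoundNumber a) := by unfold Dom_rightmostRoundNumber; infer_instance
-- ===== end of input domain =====

-- B replaces A's forward scan with flag/last-index state by a reverse scan returning the first match (simpler decomposition).

-- ===== PORT A =====
-- A's while loop as a fold over the list carrying (x, n, f)
def rrStep (s : Int × Int × Bool) (v : Int) : Int × Int × Bool :=
  if PySem.Int.mod v 10 = 0 then (s.1 + 1, s.1, true) else (s.1 + 1, s.2.1, s.2.2)

def rightmostRoundNumber (a : List Int) : Int :=
  let s := a.foldl rrStep (0, 0, false)
  if s.2.2 then s.2.1 else -1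

-- ===== PORT B =====
-- B's 'for i in range(len(a)-1, -1, -1)' loop: walk the reversed list, counting the index down
def rrGo : List Int → Int → Int
  | [], _ => -1
  | v :: t, i => if PySem.Int.mod v 10 = 0 then i else rrGo t (i - 1)

def rightmostRoundNumber_alt (a : List Int) : Int :=
  rrGo a.reverse ((a.length : Int) - 1)

-- ===== PRECONDITION & SPEC =====
def Spec_rightmostRoundNumber (a : List Int) (out : Int) : Prop := out = rightmostRoundNumber_alt a
instance (a : List Int) (out : Int) : Decidable (Spec_rightmostRoundNumber a out) := by unfold Spec_rightmostRoundNumber; infer_instance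

-- ===== CLAIM (what is proved, stated in full; the proofs are below) =====
def Claim_equal_rightmostRoundNumber : Prop := ∀ (a : List Int), Dom_rightmostRoundNumber a → Spec_rightmostRoundNumber a (rightmostRoundNumber a)

-- ===== LEMMAS AND PROOFS =====

-- the first component of A's fold counts the elements consumed
theorem rrStep_fst (l : List Int) (s : Int × Int × Bool) :
    (l.foldl rrStep s).1 = s.1 + l.length := by
  induction l generalizing s with
  | nil => simp
  | cons v t ih =>
    simp only [List.foldl_cons, ih, rrStep]
    split <;> simp <;> omega

theorem rr_eq (a : List Int) : rightmostRoundNumber a = rightmostRoundNumber_alt a := by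
  induction a using List.reverseRecOn with
  | nil => rfl
  | append_singleton xs v ih =>
    have hfst : (xs.foldl rrStep (0, 0, false)).1 = (xs.length : Int) := by
      simpa using rrStep_fst xs (0, 0, false)
    by_cases h : PySem.Int.mod v 10 = 0
    · have h' : 10 ∣ v := (PySem.Int.mod_eq_zero_iff_dvd v 10).mp h
      simp [rightmostRoundNumber, rightmostRoundNumber_alt, List.foldl_append, rrStep, rrGo,
        h', hfst]
    · simp only [rightmostRoundNumber, rightmostRoundNumber_alt, List.foldl_append,
        List.foldl_cons, List.foldl_nil, List.reverse_append, List.reverse_singleton,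
        List.singleton_append, rrGo, rrStep, h, if_false, List.length_append,
        List.length_singleton]
      have hidx : ((xs.length + 1 : Nat) : Int) - 1 - 1 = (xs.length : Int) - 1 := by
        push_cast; omega
      rw [hidx]
      exact ih

-- ===== VERDICT (by name: the statement is the Claim_ definition above) =====
theorem rightmostRoundNumber_spec : Claim_equal_rightmostRoundNumber := by
  intro a _
  unfold Spec_rightmostRoundNumber
  exact rr_eq a
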